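-- pv_equiv track=rewrite | github.com/Lee-clipse/algorithm-repository | Data Structures/Stack/LV2_12973.py | solution
-- ===== SOURCE A (Python) =====
-- def solution(s):
--     stack = []
--     for ch in s:
--         if len(stack) == 0:
--             stack.append(ch)
--             continue
--         if stack[-1] != ch:
--             stack.append(ch)
--         else:
--             stack.pop()
--     return 1 if len(stack) == 0 else 0
-- ===== SOURCE B (Python) =====
-- def _drop_pairs(s):
--     out = []
--     i = 0
--     while i < len(s):
--         if i + 1 < len(s) and s[i] == s[i + 1]:
--             i += 2
--         else:
--             out.append(s[i])
--             i += 1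
--     return ''.join(out)
--
--
-- def solution(s):
--     while True:
--         t = _drop_pairs(s)
--         if t == s:
--             return 1 if s == '' else 0
--         s = t
-- ===== Notes on version B (the rewrite author's own statement) =====
-- stated objective: alternative
-- what changed: Replaces the one-pass explicit stack with repeated global left-to-right adjacent-pair deletion iterated to a fixed point, returning 1 iff the fixed point is the empty string.
import Mathlib
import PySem

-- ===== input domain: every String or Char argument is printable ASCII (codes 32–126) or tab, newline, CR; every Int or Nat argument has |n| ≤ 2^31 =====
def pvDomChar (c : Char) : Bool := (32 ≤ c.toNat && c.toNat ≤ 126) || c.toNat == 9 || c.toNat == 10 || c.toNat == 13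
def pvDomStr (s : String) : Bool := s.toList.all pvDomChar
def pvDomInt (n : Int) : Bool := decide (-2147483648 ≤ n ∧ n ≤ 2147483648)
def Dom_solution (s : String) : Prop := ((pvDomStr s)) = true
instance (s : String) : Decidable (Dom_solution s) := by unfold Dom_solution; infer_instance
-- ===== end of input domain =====

-- B replaces the one-pass explicit stack by repeated global adjacent-pair deletion
-- iterated to a fixed point (alternative algorithm, not claimed faster).


-- ===== PORT A =====
-- literal port of A: grow/pop a Python list used as a stack ('append' = ++ [ch],
-- 'stack[-1]' = getLast?, 'pop' = dropLast)
def solution (s : String) : Int :=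
  let stack := s.toList.foldl (fun stack ch =>
    if stack.length = 0 then stack ++ [ch]
    else if stack.getLast? ≠ some ch then stack ++ [ch]
    else stack.dropLast) ([] : List Char)
  if stack.length = 0 then 1 else 0

-- ===== PORT B =====
-- one left-to-right pass of Source B's _drop_pairs: drop each adjacent equal pair, skip 2
def dropPairs : List Char → List Char
  | [] => []
  | [a] => [a]
  | a :: b :: rest => if a = b then dropPairs rest else a :: dropPairs (b :: rest)

theorem dropPairs_len_lt : ∀ l : List Char, dropPairs l = l ∨ (dropPairs l).length < l.length := by
  intro l
  induction l using dropPairs.induct with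
  | case1 => left; rfl
  | case2 a => left; rfl
  | case3 b rest ih =>
    right
    have hdp : dropPairs (b :: b :: rest) = dropPairs rest := by simp [dropPairs]
    rw [hdp]
    rcases ih with h' | h' <;> simp [h'] <;> try omega
  | case4 a b rest h ih =>
    simp only [dropPairs, if_neg h]
    rcases ih with h' | h'
    · left; rw [h']
    · right; simp only [List.length_cons] at h' ⊢; omega

-- Source B's while-loop: iterate dropPairs to a fixed point, then test emptiness
def solveFix (l : List Char) : Int :=
  if _h : dropPairs l = l then (if l = [] then 1 else 0)
  else solveFix (dropPairs l)
termination_by l.length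
decreasing_by
  rcases dropPairs_len_lt l with h' | h'
  · exact absurd h' ‹¬dropPairs l = l›
  · exact h'

def solution_alt (s : String) : Int := solveFix s.toList

-- ===== PRECONDITION & SPEC =====
def Spec_solution (s : String) (out : Int) : Prop := out = solution_alt s
instance (s : String) (out : Int) : Decidable (Spec_solution s out) := by unfold Spec_solution; infer_instance

-- ===== CLAIM (what is proved, stated in full; the proofs are below) =====
def Claim_equal_solution : Prop := ∀ (s : String), Dom_solution s → Spec_solution s (solution s)

-- ===== LEMMAS AND PROOFS =====

-- reversed-stack model of A's loop body
def step (st : List Char) (c : Char) : List Char :=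
  match st with
  | [] => [c]
  | t :: ts => if t = c then ts else c :: t :: ts

theorem bodyA_eq_step : ∀ (S : List Char) (a : Char),
    (if S.length = 0 then S ++ [a]
     else if S.getLast? ≠ some a then S ++ [a]
     else S.dropLast) = (step S.reverse a).reverse := by
  intro S a
  match hS : S.reverse with
  | [] => simp_all [step, List.reverse_eq_nil_iff.mp hS]
  | x :: xs =>
    have hS' : S = xs.reverse ++ [x] := by
      have := congrArg List.reverse hS; simpa using this
    subst hS'
    by_cases hx : x = a
    · simp [step, hx]
    · simp [step, hx]

-- A's fold equals the reversed step-fold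
theorem foldA_eq_step : ∀ (l : List Char) (S : List Char),
    l.foldl (fun stack ch =>
      if stack.length = 0 then stack ++ [ch]
      else if stack.getLast? ≠ some ch then stack ++ [ch]
      else stack.dropLast) S = (l.foldl step S.reverse).reverse := by
  intro l
  induction l with
  | nil => simp
  | cons a l ih =>
    intro S
    simp only [List.foldl_cons]
    rw [bodyA_eq_step S a, ih]
    simp

theorem step_reduced {st : List Char} (h : List.IsChain (· ≠ ·) st) (c : Char) :
    List.IsChain (· ≠ ·) (step st c) := by
  match st with
  | [] => simp [step]
  | t :: ts =>
    by_cases htc : t = c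
    · have := (List.isChain_cons.mp h).2
      simpa [step, htc] using this
    · have hs : step (t :: ts) c = c :: t :: ts := by simp [step, htc]
      rw [hs]
      refine List.isChain_cons.mpr ⟨?_, h⟩
      intro y hy
      simp only [List.head?_cons, Option.mem_def, Option.some.injEq] at hy
      subst hy; exact Ne.symm htc

theorem step_step {st : List Char} (h : List.IsChain (· ≠ ·) st) (c : Char) :
    step (step st c) c = st := by
  match st with
  | [] => simp [step]
  | t :: ts =>
    by_cases htc : t = c
    · subst htc
      match ts with
      | [] => simp [step]
      | u :: us =>
        have htu : t ≠ u := by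
          have := (List.isChain_cons.mp h).1
          simpa using this u
        simp [step, Ne.symm htu]
    · simp [step, htc]

-- one dropPairs pass does not change the step-fold from any reduced stack
theorem fold_dropPairs : ∀ (l : List Char) (st : List Char),
    List.IsChain (· ≠ ·) st → (dropPairs l).foldl step st = l.foldl step st := by
  intro l
  induction l using dropPairs.induct with
  | case1 => intro st _; rfl
  | case2 a => intro st _; rfl
  | case3 b rest ih =>
    intro st hst
    have hdp : dropPairs (b :: b :: rest) = dropPairs rest := by simp [dropPairs]
    rw [hdp, ih st hst, List.foldl_cons, List.foldl_cons, step_step hst]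
  | case4 a b rest h ih =>
    intro st hst
    simp only [dropPairs, if_neg h, List.foldl_cons]
    exact ih (step st a) (step_reduced hst a)

-- a fixed point of dropPairs has no adjacent equal pair
theorem dropPairs_fix_chain : ∀ l : List Char, dropPairs l = l → List.IsChain (· ≠ ·) l := by
  intro l
  induction l using dropPairs.induct with
  | case1 => intro _; simp
  | case2 a => intro _; simp
  | case3 b rest ih =>
    intro hfix
    exfalso
    have hdp : dropPairs (b :: b :: rest) = dropPairs rest := by simp [dropPairs]
    rw [hdp] at hfix
    rcases dropPairs_len_lt rest with h' | h'
    · rw [h'] at hfix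
      have := congrArg List.length hfix; simp at this; omega
    · have := congrArg List.length hfix; simp at this; omega
  | case4 a b rest h ih =>
    intro hfix
    simp only [dropPairs, if_neg h, List.cons.injEq] at hfix
    refine List.isChain_cons.mpr ⟨?_, ih hfix.2⟩
    intro y hy
    simp only [List.head?_cons, Option.mem_def, Option.some.injEq] at hy
    subst hy; exact h

-- a pair-free list is pushed verbatim by the step-fold
theorem fold_of_chain : ∀ (l st : List Char),
    List.IsChain (· ≠ ·) (l.reverse ++ st) → l.foldl step st = l.reverse ++ st := by
  intro l
  induction l with
  | nil => simp
  | cons a l ih =>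
    intro st hch
    have hch' : List.IsChain (· ≠ ·) (l.reverse ++ a :: st) := by simpa using hch
    have hpush : step st a = a :: st := by
      match st with
      | [] => rfl
      | x :: xs =>
        have hax : a ≠ x := by
          have hAst := (List.isChain_append.mp hch').2.1
          exact (List.isChain_cons.mp hAst).1 x (by simp)
        simp [step, Ne.symm hax]
    simp only [List.foldl_cons, hpush]
    rw [ih (a :: st) hch']
    simp

-- solveFix decides emptiness of the stack-normal form
theorem solveFix_eq : ∀ l : List Char,
    solveFix l = (if l.foldl step [] = [] then 1 else 0) := by
  intro l
  induction l using solveFix.induct with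
  | case1 _ => rw [solveFix]; simp [dropPairs]
  | case2 l hfix hne =>
    rw [solveFix, dif_pos hfix]
    have hch := dropPairs_fix_chain l hfix
    have hrev : List.IsChain (· ≠ ·) (l.reverse ++ ([] : List Char)) := by
      simp only [List.append_nil]
      rw [List.isChain_reverse]
      exact hch.imp (fun _ _ hne2 => Ne.symm hne2)
    rw [fold_of_chain l [] hrev]
    simp [hne]
  | case3 l hfix ih =>
    rw [solveFix, dif_neg hfix, ih, fold_dropPairs l [] (by simp)]

-- ===== VERDICT (by name: the statement is the Claim_ definition above) =====
theorem solution_spec : Claim_equal_solution := by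
  intro s _
  unfold Spec_solution solution solution_alt
  rw [solveFix_eq, foldA_eq_step _ []]
  simp only [List.reverse_nil, List.length_reverse, List.length_eq_zero_iff]
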